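-- pv_equiv track=rewrite | github.com/didymo/dicompyler | src/Model/ROI.py | get_contour_pixel_data
-- ===== SOURCE A (Python) =====
-- def get_contour_pixel_data(pixlut, contour, prone = False, feetfirst = False):
--     contour_pixel_data = []
--
--     for i in range(0, len(contour), 3):
--         for x, x_val in enumerate(pixlut[0]):
--             if(x_val > contour[i] and not prone and not feetfirst):
--                 break
--             elif (x_val < contour[i]):
--                 if feetfirst or prone:
--                     break
--         for y, y_val in enumerate(pixlut[1]):
--             if (y_val > contour[i+1] and not prone):
--                 break
--             elif (y_val < contour[i+1] and prone):
--                 break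
--         contour_pixel_data.append((x, y))
--     return contour_pixel_data
-- ===== SOURCE B (Python) =====
-- # Faster exact re-implementation: per-row prefix extrema turn the linear
-- # "first index where the break condition fires" scan into a binary search.
-- def _prefix(row, use_min):
--     # running extremum of row[0..j]; monotone, so the break predicate on it
--     # is monotone in j and binary-searchable
--     acc = []
--     m = row[0]
--     for v in row:
--         m = min(m, v) if use_min else max(m, v)
--         acc.append(m)
--     return acc
--
--
-- def _first_idx(pref, c, below):
--     # least j with (pref[j] < c if below else pref[j] > c); len(pref)-1 if none
--     lo, hi = 0, len(pref)
--     while lo < hi: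
--         mid = (lo + hi) // 2
--         hit = pref[mid] < c if below else pref[mid] > c
--         if hit:
--             hi = mid
--         else:
--             lo = mid + 1
--     return lo if lo < len(pref) else len(pref) - 1
--
--
-- def get_contour_pixel_data(pixlut, contour, prone=False, feetfirst=False):
--     if not contour:
--         return []
--     x_below = prone or feetfirst   # x loop breaks on value < c, else on value > c
--     y_below = prone
--     px = _prefix(pixlut[0], x_below)
--     py = _prefix(pixlut[1], y_below)
--     out = []
--     for i in range(0, len(contour), 3):
--         out.append((_first_idx(px, contour[i], x_below),
--                     _first_idx(py, contour[i + 1], y_below)))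
--     return out
-- ===== Notes on version B (the rewrite author's own statement) =====
-- stated objective: faster
-- what changed: B precomputes per-row running prefix extrema (monotone arrays) once and replaces A's inner linear scan per contour point by a binary search on the prefix array, so each point costs O(log n) instead of O(n).
import Mathlib
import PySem

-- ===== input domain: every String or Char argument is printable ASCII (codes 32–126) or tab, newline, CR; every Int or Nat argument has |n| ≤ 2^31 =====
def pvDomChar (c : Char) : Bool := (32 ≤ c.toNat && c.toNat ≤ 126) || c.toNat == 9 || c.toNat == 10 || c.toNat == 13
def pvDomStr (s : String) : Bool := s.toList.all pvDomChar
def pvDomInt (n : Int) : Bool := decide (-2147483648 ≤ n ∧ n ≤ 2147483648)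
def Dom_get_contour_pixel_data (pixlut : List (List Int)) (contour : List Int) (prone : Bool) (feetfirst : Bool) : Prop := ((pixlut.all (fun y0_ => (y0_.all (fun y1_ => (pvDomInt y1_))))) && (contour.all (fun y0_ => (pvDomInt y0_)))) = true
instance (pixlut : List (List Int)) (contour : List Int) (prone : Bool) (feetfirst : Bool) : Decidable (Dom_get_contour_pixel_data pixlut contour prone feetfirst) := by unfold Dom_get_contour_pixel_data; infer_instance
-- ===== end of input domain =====

-- B replaces A's O(m*n) inner linear scans by per-row prefix-extremum arrays plus
-- binary search (O(n + m log n)); return values are proved identical on Pre_.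

-- ===== PORT A =====
-- break condition of A's x-loop (the if/elif pair, in source order)
def pvCondX (prone feetfirst : Bool) (c v : Int) : Bool :=
  if v > c && !prone && !feetfirst then true
  else if v < c && (feetfirst || prone) then true
  else false

-- break condition of A's y-loop
def pvCondY (prone : Bool) (c v : Int) : Bool :=
  if v > c && !prone then true
  else if v < c && prone then true
  else false

-- 'for j, v in enumerate(row): if cond(v): break' — value of the loop variable
-- afterwards: break index, or last index if the loop completes ((j:Int)-1 at the
-- empty tail = len-1; for an empty row Python raises NameError: excluded by Pre_)
def pvScan (cond : Int → Bool) (j : Nat) : List Int → Int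
  | [] => (j : Int) - 1
  | v :: r => if cond v then (j : Int) else pvScan cond (j + 1) r

def get_contour_pixel_data (pixlut : List (List Int)) (contour : List Int) (prone : Bool) (feetfirst : Bool) : List (Int × Int) :=
  let row0 := pixlut.getD 0 []
  let row1 := pixlut.getD 1 []
  (PySem.List.pyRange 0 (contour.length : Int) 3).foldl (fun acc i =>
      acc ++ [(pvScan (pvCondX prone feetfirst (PySem.List.pyGetD contour i 0)) 0 row0,
               pvScan (pvCondY prone (PySem.List.pyGetD contour (i + 1) 0)) 0 row1)]) []

-- ===== PORT B =====
-- hit predicate searched for (below = search for v < c, else v > c)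
def pvHit (below : Bool) (c v : Int) : Bool := if below then v < c else v > c

-- running extremum step
def pvOp (below : Bool) (m v : Int) : Int := if below then min m v else max m v

-- _prefix of Source B: running extremum list (the foldl carries (m, acc) as in the Python loop)
def pvPrefix (row : List Int) (below : Bool) : List Int :=
  (row.foldl (fun (s : Int × List Int) v =>
      let m := pvOp below s.1 v; (m, s.2 ++ [m])) (row.headD 0, ([] : List Int))).2

-- _first_idx of Source B: the while lo < hi binary-search loop
def pvBS (pref : List Int) (c : Int) (below : Bool) (lo hi : Nat) : Nat :=
  if h : lo < hi then
    let mid := (lo + hi) / 2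
    if pvHit below c (pref.getD mid 0) then pvBS pref c below lo mid
    else pvBS pref c below (mid + 1) hi
  else lo
termination_by hi - lo
decreasing_by all_goals omega

def pvFirstIdx (pref : List Int) (c : Int) (below : Bool) : Int :=
  let r := pvBS pref c below 0 pref.length
  if r < pref.length then (r : Int) else (pref.length : Int) - 1

def get_contour_pixel_data_alt (pixlut : List (List Int)) (contour : List Int) (prone : Bool) (feetfirst : Bool) : List (Int × Int) :=
  if contour = [] then []
  else
    let xBelow := prone || feetfirst
    let yBelow := prone
    let px := pvPrefix (pixlut.getD 0 []) xBelow
    let py := pvPrefix (pixlut.getD 1 []) yBelow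
    (PySem.List.pyRange 0 (contour.length : Int) 3).foldl (fun acc i =>
        acc ++ [(pvFirstIdx px (PySem.List.pyGetD contour i 0) xBelow,
                 pvFirstIdx py (PySem.List.pyGetD contour (i + 1) 0) yBelow)]) []

-- ===== PRECONDITION & SPEC =====
-- Pre_ excludes only inputs where Python A raises: with a nonempty contour it needs
-- pixlut rows 0 and 1 to exist and be nonempty (else NameError/IndexError) and
-- len(contour) % 3 ≠ 1 (else contour[i+1] is an IndexError on the last triple).
def Pre_get_contour_pixel_data (pixlut : List (List Int)) (contour : List Int) (prone : Bool) (feetfirst : Bool) : Prop :=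
  contour = [] ∨
    (2 ≤ pixlut.length ∧ pixlut.getD 0 [] ≠ [] ∧ pixlut.getD 1 [] ≠ [] ∧ contour.length % 3 ≠ 1)
instance (pixlut : List (List Int)) (contour : List Int) (prone : Bool) (feetfirst : Bool) : Decidable (Pre_get_contour_pixel_data pixlut contour prone feetfirst) := by unfold Pre_get_contour_pixel_data; infer_instance

def pvWitness_get_contour_pixel_data : List (List Int) × List Int × Bool × Bool :=
  ([[0, 2, 4], [1, 3]], [1, 2, 0, 5, 0, 0], false, false)

def Spec_get_contour_pixel_data (pixlut : List (List Int)) (contour : List Int) (prone : Bool) (feetfirst : Bool) (out : List (Int × Int)) : Prop := out = get_contour_pixel_data_alt pixlut contour prone feetfirst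
instance (pixlut : List (List Int)) (contour : List Int) (prone : Bool) (feetfirst : Bool) (out : List (Int × Int)) : Decidable (Spec_get_contour_pixel_data pixlut contour prone feetfirst out) := by unfold Spec_get_contour_pixel_data; infer_instance

-- ===== CLAIM (what is proved, stated in full; the proofs are below) =====
def Claim_equal_get_contour_pixel_data : Prop := ∀ (pixlut : List (List Int)) (contour : List Int) (prone : Bool) (feetfirst : Bool), Dom_get_contour_pixel_data pixlut contour prone feetfirst → Pre_get_contour_pixel_data pixlut contour prone feetfirst → Spec_get_contour_pixel_data pixlut contour prone feetfirst (get_contour_pixel_data pixlut contour prone feetfirst)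

-- ===== LEMMAS AND PROOFS =====

-- unfolding equations for the binary-search loop
theorem pvBS_stop (pref : List Int) (c : Int) (below : Bool) (lo hi : Nat) (h : ¬ lo < hi) :
    pvBS pref c below lo hi = lo := by
  rw [pvBS]; simp [h]

theorem pvBS_step (pref : List Int) (c : Int) (below : Bool) (lo hi : Nat) (h : lo < hi) :
    pvBS pref c below lo hi =
      (if pvHit below c (pref.getD ((lo + hi) / 2) 0) then pvBS pref c below lo ((lo + hi) / 2)
       else pvBS pref c below ((lo + hi) / 2 + 1) hi) := by
  rw [pvBS]; simp [h]

-- recursive form of the prefix list built by pvPrefix's foldl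
def prefGo (below : Bool) (m : Int) : List Int → List Int
  | [] => []
  | v :: r => let m' := pvOp below m v; m' :: prefGo below m' r

theorem prefGo_foldl (below : Bool) (l : List Int) : ∀ (m : Int) (acc : List Int),
    (l.foldl (fun (s : Int × List Int) v =>
      let m := pvOp below s.1 v; (m, s.2 ++ [m])) (m, acc)).2 = acc ++ prefGo below m l := by
  induction l with
  | nil => intro m acc; simp [prefGo]
  | cons v r ih => intro m acc; simp [prefGo, ih]

theorem pvPrefix_eq (row : List Int) (below : Bool) :
    pvPrefix row below = prefGo below (row.headD 0) row := by
  simp [pvPrefix, prefGo_foldl]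

theorem length_prefGo (below : Bool) : ∀ (m : Int) (l : List Int),
    (prefGo below m l).length = l.length := by
  intro m l; induction l generalizing m with
  | nil => rfl
  | cons v r ih => simp [prefGo, ih]

theorem hit_op (below : Bool) (c m v : Int) :
    pvHit below c (pvOp below m v) = (pvHit below c m || pvHit below c v) := by
  cases below <;> simp [pvHit, pvOp]

-- once the carry hits, every later prefix entry hits
theorem prefGo_hit_all (below : Bool) (c : Int) : ∀ (l : List Int) (m : Int),
    pvHit below c m = true → ∀ j, j < l.length →
    pvHit below c ((prefGo below m l).getD j 0) = true := by
  intro l; induction l with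
  | nil => intro m _ j hj; simp at hj
  | cons v r ih =>
    intro m hm j hj
    have hm' : pvHit below c (pvOp below m v) = true := by rw [hit_op, hm]; rfl
    cases j with
    | zero => simpa [prefGo] using hm'
    | succ j => simpa [prefGo] using ih (pvOp below m v) hm' j (by simpa using hj)

-- monotonicity of the hit predicate along the prefix list
theorem prefGo_mono (below : Bool) (c : Int) : ∀ (l : List Int) (m : Int) (j k : Nat),
    j ≤ k → k < l.length →
    pvHit below c ((prefGo below m l).getD j 0) = true →
    pvHit below c ((prefGo below m l).getD k 0) = true := by
  intro l; induction l with
  | nil => intro m j k _ hk; simp at hk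
  | cons v r ih =>
    intro m j k hjk hk hj
    cases j with
    | zero =>
      have h0 : pvHit below c (pvOp below m v) = true := by simpa [prefGo] using hj
      cases k with
      | zero => simpa [prefGo] using h0
      | succ k =>
        simpa [prefGo] using prefGo_hit_all below c r (pvOp below m v) h0 k (by simpa using hk)
    | succ j =>
      cases k with
      | zero => omega
      | succ k =>
        simpa [prefGo] using ih (pvOp below m v) j k (by omega) (by simpa using hk)
          (by simpa [prefGo] using hj)

-- findIdx is unchanged by passing to the prefix list (carry not yet hitting)
theorem findIdx_prefGo (below : Bool) (c : Int) : ∀ (l : List Int) (m : Int),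
    pvHit below c m = false →
    (prefGo below m l).findIdx (pvHit below c) = l.findIdx (pvHit below c) := by
  intro l; induction l with
  | nil => intro m _; rfl
  | cons v r ih =>
    intro m hm
    have hstep : pvHit below c (pvOp below m v) = pvHit below c v := by
      rw [hit_op, hm]; simp
    by_cases hv : pvHit below c v = true
    · simp [prefGo, List.findIdx_cons, hstep, hv]
    · simp only [Bool.not_eq_true] at hv
      simp [prefGo, List.findIdx_cons, hstep, hv, ih (pvOp below m v) (hstep.trans hv)]

-- A's scan: first hit index, clamped to len-1 (nonempty row)
theorem pvScan_eq (cond : Int → Bool) : ∀ (l : List Int) (j : Nat), l ≠ [] →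
    pvScan cond j l = (j : Int) + (min (l.findIdx cond) (l.length - 1) : Nat) := by
  intro l
  induction l with
  | nil => intro j h; exact absurd rfl h
  | cons v r ih =>
    intro j _
    by_cases hv : cond v = true
    · have h1 : List.findIdx cond (v :: r) = 0 := by simp [List.findIdx_cons, hv]
      simp [pvScan, hv, h1]
    · simp only [Bool.not_eq_true] at hv
      have h1 : List.findIdx cond (v :: r) = r.findIdx cond + 1 := by
        simp [List.findIdx_cons, hv]
      have hstep : pvScan cond j (v :: r) = pvScan cond (j + 1) r := by
        simp [pvScan, hv]
      cases r with
      | nil =>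
        rw [hstep, h1]
        have h2 : List.findIdx cond ([] : List Int) = 0 := rfl
        rw [h2]
        have h3 : min (0 + 1) (([v] : List Int).length - 1) = 0 := by simp
        rw [h3]
        show ((j + 1 : Nat) : Int) - 1 = (j : Int) + ((0 : Nat) : Int)
        push_cast
        omega
      | cons w s =>
        rw [hstep, ih (j + 1) (by simp), h1]
        have h3 : min ((w :: s).findIdx cond + 1) ((v :: w :: s).length - 1)
            = min ((w :: s).findIdx cond) ((w :: s).length - 1) + 1 := by
          simp only [List.length_cons]
          omega
        rw [h3]
        push_cast
        omega

-- binary-search loop correctness on a monotone predicate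
theorem pvBS_spec (pref : List Int) (c : Int) (below : Bool)
    (hmono : ∀ j k, j ≤ k → k < pref.length →
      pvHit below c (pref.getD j 0) = true → pvHit below c (pref.getD k 0) = true) :
    ∀ (fuel lo hi : Nat), hi - lo ≤ fuel → lo ≤ hi → hi ≤ pref.length →
    (∀ j, j < lo → pvHit below c (pref.getD j 0) = false) →
    (∀ j, hi ≤ j → j < pref.length → pvHit below c (pref.getD j 0) = true) →
    (∀ j, j < pvBS pref c below lo hi → pvHit below c (pref.getD j 0) = false) ∧
    (∀ j, pvBS pref c below lo hi ≤ j → j < pref.length → pvHit below c (pref.getD j 0) = true) ∧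
    pvBS pref c below lo hi ≤ pref.length := by
  intro fuel
  induction fuel with
  | zero =>
    intro lo hi hf hlo hhi hlow hhigh
    rw [pvBS_stop pref c below lo hi (by omega)]
    exact ⟨hlow, fun j hj hjn => hhigh j (by omega) hjn, by omega⟩
  | succ n ih =>
    intro lo hi hf hlo hhi hlow hhigh
    by_cases h : lo < hi
    · rw [pvBS_step pref c below lo hi h]
      by_cases hhit : pvHit below c (pref.getD ((lo + hi) / 2) 0) = true
      · rw [if_pos hhit]
        exact ih lo ((lo + hi) / 2) (by omega) (by omega) (by omega) hlow
          (fun j hj hjn => hmono ((lo + hi) / 2) j (by omega) hjn hhit)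
      · rw [if_neg hhit]
        simp only [Bool.not_eq_true] at hhit
        refine ih ((lo + hi) / 2 + 1) hi (by omega) (by omega) hhi ?_ hhigh
        intro j hj
        by_cases hjlo : j < lo
        · exact hlow j hjlo
        · by_cases htr : pvHit below c (pref.getD j 0) = true
          · have := hmono j ((lo + hi) / 2) (by omega) (by omega) htr
            rw [hhit] at this; exact absurd this (by simp)
          · simpa using htr
    · rw [pvBS_stop pref c below lo hi h]
      exact ⟨hlow, fun j hj hjn => hhigh j (by omega) hjn, by omega⟩

-- pvFirstIdx = clamped findIdx, for a monotone prefix list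
theorem pvFirstIdx_eq (pref : List Int) (c : Int) (below : Bool)
    (hmono : ∀ j k, j ≤ k → k < pref.length →
      pvHit below c (pref.getD j 0) = true → pvHit below c (pref.getD k 0) = true)
    (hne : pref ≠ []) :
    pvFirstIdx pref c below = ((min (pref.findIdx (pvHit below c)) (pref.length - 1) : Nat) : Int) := by
  obtain ⟨hlow, hhigh, hle⟩ := pvBS_spec pref c below hmono pref.length 0 pref.length
    (by omega) (by omega) le_rfl (by omega) (fun j hj hjn => by omega)
  set r := pvBS pref c below 0 pref.length with hr
  have hfind : pref.findIdx (pvHit below c) = r := by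
    by_cases hrn : r < pref.length
    · refine (List.findIdx_eq hrn).mpr ⟨?_, ?_⟩
      · have := hhigh r le_rfl hrn
        rwa [List.getD_eq_getElem _ _ hrn] at this
      · intro j hj
        have := hlow j hj
        rwa [List.getD_eq_getElem _ _ (by omega)] at this
    · have hrl : r = pref.length := by omega
      rw [hrl]
      apply List.findIdx_eq_length.mpr
      intro x hx
      obtain ⟨j, hj, rfl⟩ := List.mem_iff_getElem.mp hx
      have := hlow j (by omega)
      rwa [List.getD_eq_getElem _ _ hj] at this
  have hlen : 1 ≤ pref.length := by
    cases pref with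
    | nil => exact absurd rfl hne
    | cons a l => simp
  unfold pvFirstIdx
  rw [← hr, hfind]
  by_cases hrn : r < pref.length
  · rw [if_pos hrn]; omega
  · rw [if_neg hrn]; omega

-- the per-element equality: A's scan = B's binary search (any row, incl. empty)
theorem scan_eq_firstIdx (row : List Int) (c : Int) (below : Bool) :
    pvScan (pvHit below c) 0 row = pvFirstIdx (pvPrefix row below) c below := by
  cases row with
  | nil =>
    have hp : pvPrefix ([] : List Int) below = [] := rfl
    rw [hp, pvFirstIdx]
    simp [pvScan]
  | cons v r =>
    have hne : (v :: r : List Int) ≠ [] := by simp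
    have hpref : pvPrefix (v :: r) below = prefGo below v (v :: r) := by
      rw [pvPrefix_eq]; rfl
    have hlen : (prefGo below v (v :: r)).length = (v :: r).length :=
      length_prefGo below v (v :: r)
    have hprefne : prefGo below v (v :: r) ≠ [] := by
      intro h; rw [h] at hlen; simp at hlen
    have hmono' : ∀ j k, j ≤ k → k < (prefGo below v (v :: r)).length →
        pvHit below c ((prefGo below v (v :: r)).getD j 0) = true →
        pvHit below c ((prefGo below v (v :: r)).getD k 0) = true := by
      intro j k hjk hk hj
      rw [hlen] at hk
      exact prefGo_mono below c (v :: r) v j k hjk hk hj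
    have hvv : pvOp below v v = v := by cases below <;> simp [pvOp]
    have hfind : (prefGo below v (v :: r)).findIdx (pvHit below c)
        = (v :: r).findIdx (pvHit below c) := by
      show (let m' := pvOp below v v; m' :: prefGo below m' r).findIdx (pvHit below c) = _
      simp only [hvv]
      by_cases hv : pvHit below c v = true
      · simp [List.findIdx_cons, hv]
      · simp only [Bool.not_eq_true] at hv
        simp [List.findIdx_cons, hv, findIdx_prefGo below c r v hv]
    rw [hpref, pvFirstIdx_eq _ c below hmono' hprefne, hfind, hlen,
      pvScan_eq (pvHit below c) (v :: r) 0 hne]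
    simp

-- A's branch conditions are exactly pvHit
theorem condX_eq (prone feetfirst : Bool) (c : Int) :
    pvCondX prone feetfirst c = pvHit (prone || feetfirst) c := by
  funext v
  cases prone <;> cases feetfirst <;> simp [pvCondX, pvHit]

theorem condY_eq (prone : Bool) (c : Int) :
    pvCondY prone c = pvHit prone c := by
  funext v
  cases prone <;> simp [pvCondY, pvHit]

-- ===== VERDICT (by name: the statement is the Claim_ definition above) =====
theorem get_contour_pixel_data_spec : Claim_equal_get_contour_pixel_data := by
  intro pixlut contour prone feetfirst _ _
  unfold Spec_get_contour_pixel_data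
  unfold get_contour_pixel_data get_contour_pixel_data_alt
  by_cases hc : contour = []
  · subst hc
    have h0 : PySem.List.pyRange 0 0 3 = [] := by decide
    simp [h0]
  · simp only [if_neg hc]
    congr 1
    funext acc i
    rw [condX_eq, condY_eq, scan_eq_firstIdx, scan_eq_firstIdx]
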